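-- pv_equiv track=rewrite | github.com/andersslarsen/Big-Data-Architecture | projectPartTwo.py | windowSlider
-- ===== SOURCE A (Python) =====
-- from itertools import permutations
--
-- def windowSlider(someList):
--     W = []
--     S = []
--     for w in someList:
--         if len(W)==5:
--             edges = permutations(W,2)
--             for perm in edges:
--                 if perm[0]!=perm[1]:
--                     S.append(perm)
--             W.pop(0)
--         W.append(w)
--     return S
-- ===== SOURCE B (Python) =====
-- from itertools import permutations
--
-- def windowSlider(someList):
--     xs = list(someList)
--     S = []
--     for i in range(len(xs) - 5):
--         for perm in permutations(xs[i:i+5], 2):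
--             if perm[0] != perm[1]:
--                 S.append(perm)
--     return S
-- ===== Notes on version B (the rewrite author's own statement) =====
-- stated objective: simpler
-- what changed: B replaces A's mutable sliding window (pop(0)/append with emission gated on seeing the next element) by direct index-based slicing: for i in range(n-5) emit the distinct pairs of the slice xs[i:i+5].
import Mathlib
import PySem

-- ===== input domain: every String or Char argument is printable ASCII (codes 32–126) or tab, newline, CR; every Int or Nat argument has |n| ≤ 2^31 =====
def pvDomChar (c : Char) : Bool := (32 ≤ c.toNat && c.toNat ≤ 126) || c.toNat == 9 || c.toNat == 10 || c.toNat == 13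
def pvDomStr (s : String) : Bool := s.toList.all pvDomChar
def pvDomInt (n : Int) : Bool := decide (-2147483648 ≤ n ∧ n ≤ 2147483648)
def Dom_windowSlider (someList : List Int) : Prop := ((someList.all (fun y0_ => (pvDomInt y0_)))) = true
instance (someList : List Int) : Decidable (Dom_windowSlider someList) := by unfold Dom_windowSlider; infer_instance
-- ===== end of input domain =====

-- B replaces A's mutable pop(0)/append sliding window by direct index-based slicing over range(n-5); objective: simpler.


-- ===== PORT A =====
-- itertools.permutations(W, 2): pairs (W[j], W[k]) for index j ≠ index k, j outer ascending, k inner ascending.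
def permPairs (W : List Int) : List (Int × Int) :=
  (List.range W.length).flatMap (fun j =>
    (List.range W.length).filterMap (fun k =>
      if j ≠ k then some (W.getD j 0, W.getD k 0) else none))

-- A's loop over someList with mutable state W (window) and S (output accumulator).
def windowSliderLoop : List Int → List Int → List (Int × Int) → List (Int × Int)
  | [], _, S => S
  | w :: rest, W, S =>
    if W.length = 5 then
      -- emit filtered permutations, then W.pop(0); W.append(w)
      windowSliderLoop rest (W.drop 1 ++ [w])
        (S ++ (permPairs W).filter (fun p => p.1 ≠ p.2))
    else
      windowSliderLoop rest (W ++ [w]) S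

def windowSlider (someList : List Int) : List (Int × Int) :=
  windowSliderLoop someList [] []

-- ===== PORT B =====
-- for i in range(len(xs) - 5): emit filtered permutations of the slice xs[i:i+5]
def windowSlider_alt (someList : List Int) : List (Int × Int) :=
  (List.range (someList.length - 5)).flatMap (fun i =>
    (permPairs ((someList.drop i).take 5)).filter (fun p => p.1 ≠ p.2))

-- ===== PRECONDITION & SPEC =====
def Spec_windowSlider (someList : List Int) (out : List (Int × Int)) : Prop := out = windowSlider_alt someList
instance (someList : List Int) (out : List (Int × Int)) : Decidable (Spec_windowSlider someList out) := by unfold Spec_windowSlider; infer_instance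

-- ===== CLAIM (what is proved, stated in full; the proofs are below) =====
def Claim_equal_windowSlider : Prop := ∀ (someList : List Int), Dom_windowSlider someList → Spec_windowSlider someList (windowSlider someList)

-- ===== LEMMAS AND PROOFS =====

-- Shorthand used only in the proofs.
def emitW (W : List Int) : List (Int × Int) := (permPairs W).filter (fun p => p.1 ≠ p.2)

theorem windowSliderLoop_full (xs : List Int) : ∀ (W : List Int) (S : List (Int × Int)),
    W.length = 5 →
    windowSliderLoop xs W S =
      S ++ (List.range xs.length).flatMap (fun i => emitW (((W ++ xs).drop i).take 5)) := by
  induction xs with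
  | nil => intro W S _; simp [windowSliderLoop]
  | cons x xs ih =>
    intro W S hW
    have hWne : W ≠ [] := by intro h; simp [h] at hW
    rw [windowSliderLoop, if_pos hW]
    rw [ih (W.drop 1 ++ [x]) _ (by simp [hW])]
    rw [List.length_cons, List.range_succ_eq_map]
    simp only [List.flatMap_cons, List.flatMap_map]
    have h0 : ((W ++ x :: xs).drop 0).take 5 = W := by
      simp [hW]
    have hstep : ∀ i : ℕ, (W ++ x :: xs).drop (i + 1) = ((W.drop 1 ++ [x]) ++ xs).drop i := by
      intro i
      cases W with
      | nil => simp at hW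
      | cons a W' => simp [List.drop_succ_cons, List.drop_append]
    have hbody : (fun i => emitW (((W.drop 1 ++ [x] ++ xs).drop i).take 5)) =
        (fun i : ℕ => emitW (((W ++ x :: xs).drop (i + 1)).take 5)) := by
      funext i; rw [hstep]
    rw [hbody, h0]
    simp [emitW, List.append_assoc]

theorem windowSlider_eq_alt (xs : List Int) : windowSlider xs = windowSlider_alt xs := by
  match xs with
  | [] => rfl
  | [a] => rfl
  | [a, b] => rfl
  | [a, b, c] => rfl
  | [a, b, c, d] => rfl
  | a :: b :: c :: d :: e :: rest =>
    have hstart : windowSlider (a :: b :: c :: d :: e :: rest) =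
        windowSliderLoop rest [a, b, c, d, e] [] := by
      simp [windowSlider, windowSliderLoop]
    rw [hstart, windowSliderLoop_full rest [a, b, c, d, e] [] rfl]
    simp [windowSlider_alt, emitW]

-- ===== VERDICT (by name: the statement is the Claim_ definition above) =====
theorem windowSlider_spec : Claim_equal_windowSlider := by
  intro xs _
  exact windowSlider_eq_alt xs
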